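-- pv_equiv track=rewrite | github.com/ondrejch/Molten_salt_chemistry | Simulation_Surrogacy/Mapping_Plotter.py | get_colors_with_repeats
-- ===== SOURCE A (Python) =====
-- def get_colors_with_repeats(n):
--     """Generate colors, allowing repeats but tracking repetition"""
--     base_colors = [
--         '#1f77b4', '#ff7f0e', '#2ca02c', '#d62728', '#9467bd',
--         '#8c564b', '#e377c2', '#7f7f7f', '#bcbd22', '#17becf'
--     ]
--
--     colors = []
--     color_usage = {}  # Track how many times each color is used
--
--     for i in range(n):
--         color = base_colors[i % len(base_colors)]
--         if color not in color_usage: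
--             color_usage[color] = 1
--         else:
--             color_usage[color] += 1
--         colors.append((color, color_usage[color]))
--
--     return colors
-- ===== SOURCE B (Python) =====
-- def get_colors_with_repeats(n):
--     """Generate colors, allowing repeats but tracking repetition"""
--     base_colors = [
--         '#1f77b4', '#ff7f0e', '#2ca02c', '#d62728', '#9467bd',
--         '#8c564b', '#e377c2', '#7f7f7f', '#bcbd22', '#17becf'
--     ]
--     L = len(base_colors)
--     return [(base_colors[i % L], i // L + 1) for i in range(n)]
-- ===== Notes on version B (the rewrite author's own statement) =====
-- stated objective: simpler
-- what changed: Dropped the color_usage dict and its if/else tracking: the repeat count is the closed form i // len(base_colors) + 1, so B builds each (color, count) pair directly in one comprehension with no state carried across iterations.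
import Mathlib
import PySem

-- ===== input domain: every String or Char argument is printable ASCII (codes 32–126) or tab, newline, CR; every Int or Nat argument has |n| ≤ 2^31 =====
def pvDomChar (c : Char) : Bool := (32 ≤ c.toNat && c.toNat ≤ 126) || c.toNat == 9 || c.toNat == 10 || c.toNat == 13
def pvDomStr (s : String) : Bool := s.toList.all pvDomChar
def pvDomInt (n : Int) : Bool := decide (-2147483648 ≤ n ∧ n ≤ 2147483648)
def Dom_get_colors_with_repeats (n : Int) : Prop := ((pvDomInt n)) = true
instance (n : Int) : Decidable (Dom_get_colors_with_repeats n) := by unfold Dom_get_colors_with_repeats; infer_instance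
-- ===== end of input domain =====

-- B drops A's color_usage dict and if/else tracking: the repeat count is the closed form i // 10 + 1 (simpler).

-- ===== PORT A =====
def pvBase : List String :=
  ["#1f77b4", "#ff7f0e", "#2ca02c", "#d62728", "#9467bd",
   "#8c564b", "#e377c2", "#7f7f7f", "#bcbd22", "#17becf"]

-- one iteration of A's for-loop: pick the cycled color, update the usage dict, append the pair
def pvStep (st : List (String × Int) × PySem.Dict String Int) (i : Int) :
    List (String × Int) × PySem.Dict String Int :=
  let color := PySem.List.pyGetD pvBase (PySem.Int.mod i (pvBase.length : Int)) ""
  let cnt : Int :=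
    match st.2.get? color with
    | none => 1
    | some v => v + 1
  (st.1 ++ [(color, cnt)], st.2.insert color cnt)

def get_colors_with_repeats (n : Int) : List (String × Int) :=
  ((PySem.List.pyRange 0 n 1).foldl pvStep ([], PySem.Dict.empty)).1

-- ===== PORT B =====
def get_colors_with_repeats_alt (n : Int) : List (String × Int) :=
  (PySem.List.pyRange 0 n 1).map (fun i =>
    (PySem.List.pyGetD pvBase (PySem.Int.mod i (pvBase.length : Int)) "",
     PySem.Int.floordiv i (pvBase.length : Int) + 1))

-- ===== PRECONDITION & SPEC =====
def Spec_get_colors_with_repeats (n : Int) (out : List (String × Int)) : Prop := out = get_colors_with_repeats_alt n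
instance (n : Int) (out : List (String × Int)) : Decidable (Spec_get_colors_with_repeats n out) := by unfold Spec_get_colors_with_repeats; infer_instance

-- ===== CLAIM (what is proved, stated in full; the proofs are below) =====
def Claim_equal_get_colors_with_repeats : Prop := ∀ (n : Int), Dom_get_colors_with_repeats n → Spec_get_colors_with_repeats n (get_colors_with_repeats n)

-- ===== LEMMAS AND PROOFS =====

-- number of j < m with j % 10 = k (for k < 10)
def pvCnt (m k : Nat) : Nat := (m + 9 - k) / 10

def pvColorN (k : Nat) : String := pvBase.getD k ""

def pvFold (m : Nat) : List (String × Int) × PySem.Dict String Int :=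
  (PySem.List.pyRange 0 (m : Int) 1).foldl pvStep ([], PySem.Dict.empty)

lemma pvColorN_ne (k k' : Nat) (hk : k < 10) (hk' : k' < 10) (h : k ≠ k') :
    pvColorN k ≠ pvColorN k' := by
  have H : ∀ a < 10, ∀ b < 10, a ≠ b → pvColorN a ≠ pvColorN b := by decide
  exact H k hk k' hk' h

lemma pvColorN_mem (k : Nat) (hk : k < 10) : pvColorN k ∈ pvBase := by
  revert hk; revert k; decide

lemma pvColor_eq (m : Nat) :
    PySem.List.pyGetD pvBase (PySem.Int.mod (m : Int) (pvBase.length : Int)) ""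
      = pvColorN (m % 10) := by
  have h10 : (pvBase.length : Int) = ((10 : Nat) : Int) := by decide
  rw [h10, PySem.Int.mod_natCast, PySem.List.pyGetD_natCast]
  rfl

lemma pvFloordiv_eq (m : Nat) :
    PySem.Int.floordiv (m : Int) (pvBase.length : Int) = ((m / 10 : Nat) : Int) := by
  have h10 : (pvBase.length : Int) = ((10 : Nat) : Int) := by decide
  rw [h10, PySem.Int.floordiv_natCast]

lemma pv_inv (m : Nat) :
    (pvFold m).1 = get_colors_with_repeats_alt (m : Int) ∧
    (∀ k : Nat, k < 10 →
      (pvFold m).2.get? (pvColorN k)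
        = (if pvCnt m k = 0 then none else some ((pvCnt m k : Nat) : Int))) ∧
    (∀ s : String, s ∉ pvBase → (pvFold m).2.get? s = none) := by
  induction m with
  | zero =>
    refine ⟨by decide, ?_, ?_⟩
    · intro k hk
      have hc : pvCnt 0 k = 0 := by unfold pvCnt; omega
      simp [hc, pvFold, PySem.List.pyRange_one_eq_nil (by omega : (0:Int) ≤ 0),
        PySem.Dict.empty, PySem.Dict.get?]
    · intro s _
      simp [pvFold, PySem.List.pyRange_one_eq_nil (by omega : (0:Int) ≤ 0),
        PySem.Dict.empty, PySem.Dict.get?]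
  | succ m ih =>
    obtain ⟨ih1, ih2, ih3⟩ := ih
    have hsplit : PySem.List.pyRange 0 ((m + 1 : Nat) : Int) 1
        = PySem.List.pyRange 0 (m : Int) 1 ++ [(m : Int)] := by
      have : ((m + 1 : Nat) : Int) = (m : Int) + 1 := by push_cast; ring
      rw [this, PySem.List.pyRange_one_succ_right (by omega)]
    have hfold : pvFold (m + 1) = pvStep (pvFold m) (m : Int) := by
      unfold pvFold
      rw [hsplit, List.foldl_append, List.foldl_cons, List.foldl_nil]
    -- the color chosen at step m, and its current count
    have hkm : m % 10 < 10 := by omega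
    have hget := ih2 (m % 10) hkm
    have hcm : pvCnt m (m % 10) = m / 10 := by unfold pvCnt; omega
    rw [hcm] at hget
    have hcnt :
        (match (pvFold m).2.get? (pvColorN (m % 10)) with
          | none => (1 : Int)
          | some v => v + 1) = ((m / 10 : Nat) : Int) + 1 := by
      rw [hget]
      by_cases h0 : m / 10 = 0
      · simp [h0]
      · simp [h0]
    have hstep : pvStep (pvFold m) (m : Int)
        = ((pvFold m).1 ++ [(pvColorN (m % 10), ((m / 10 : Nat) : Int) + 1)],
           (pvFold m).2.insert (pvColorN (m % 10)) (((m / 10 : Nat) : Int) + 1)) := by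
      simp only [pvStep]
      rw [pvColor_eq, hcnt]
    refine ⟨?_, ?_, ?_⟩
    · rw [hfold, hstep]
      show (pvFold m).1 ++ _ = _
      rw [ih1]
      unfold get_colors_with_repeats_alt
      rw [hsplit, List.map_append, List.map_cons, List.map_nil,
        pvColor_eq, pvFloordiv_eq]
    · intro k hk
      rw [hfold, hstep]
      show ((pvFold m).2.insert _ _).get? (pvColorN k) = _
      by_cases hkk : k = m % 10
      · subst hkk
        rw [PySem.Dict.get?_insert_self]
        have : pvCnt (m + 1) (m % 10) = m / 10 + 1 := by unfold pvCnt; omega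
        rw [this]
        simp
      · rw [PySem.Dict.get?_insert_of_ne _ _ (pvColorN_ne k (m % 10) hk hkm hkk)]
        have : pvCnt (m + 1) k = pvCnt m k := by unfold pvCnt; omega
        rw [this]
        exact ih2 k hk
    · intro s hs
      rw [hfold, hstep]
      show ((pvFold m).2.insert _ _).get? s = _
      have hne : s ≠ pvColorN (m % 10) := by
        intro h; exact hs (h ▸ pvColorN_mem (m % 10) hkm)
      rw [PySem.Dict.get?_insert_of_ne _ _ hne]
      exact ih3 s hs

-- ===== VERDICT (by name: the statement is the Claim_ definition above) =====
theorem get_colors_with_repeats_spec : Claim_equal_get_colors_with_repeats := by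
  intro n _
  unfold Spec_get_colors_with_repeats
  by_cases hn : n ≤ 0
  · simp [get_colors_with_repeats, get_colors_with_repeats_alt,
      PySem.List.pyRange_one_eq_nil hn]
  · have hnn : ((n.toNat : Nat) : Int) = n := Int.toNat_of_nonneg (by omega)
    have hB := (pv_inv n.toNat).1
    rw [hnn] at hB
    have hA : get_colors_with_repeats n = (pvFold n.toNat).1 := by
      unfold get_colors_with_repeats pvFold
      rw [hnn]
    rw [hA]
    exact hB
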